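-- pv_equiv track=rewrite | github.com/yuqi-lee/VFScheduling | utils/lstm.py | count_long_intervals
-- ===== SOURCE A (Python) =====
-- def count_long_intervals(list1, list2):
--     if len(list1) != len(list2):
--         raise ValueError("length is not equal.")
--
--     count = 0
--     in_interval = False
--     interval_length = 0
--
--     for i in range(len(list1)):
--         if list2[i] < list1[i]:
--             if not in_interval:
--                 in_interval = True
--                 interval_length = 1  # 开始新的区间
--             else:
--                 interval_length += 1  # 增加当前区间的长度
--         else:
--             if in_interval:
--                 if interval_length > 60:
--                     count += 1  # 结束区间且长度大于60
--                 in_interval = False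
--                 interval_length = 0  # 重置区间长度
--
--     # 检查最后一个区间
--     if in_interval and interval_length > 60:
--         count += 1
--
--     return count
-- ===== SOURCE B (Python) =====
-- def count_long_intervals(list1, list2):
--     if len(list1) != len(list2):
--         raise ValueError("length is not equal.")
--     # A run longer than 60 is counted once, at its start: a position i where
--     # list2[i] < list1[i] holds, it did not hold at i-1 (or i == 0), and it
--     # keeps holding through a window of 61 consecutive positions.
--     cmps = [b < a for a, b in zip(list1, list2)]
--     n = len(cmps)
--     return sum(1 for i in range(n)
--                if cmps[i]
--                and (i == 0 or not cmps[i - 1])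
--                and i + 61 <= n
--                and all(cmps[i:i + 61]))
-- ===== Notes on version B (the rewrite author's own statement) =====
-- stated objective: alternative
-- what changed: Replaces A's running in_interval/interval_length state machine with a stateless per-index test on the precomputed comparison sequence: count the positions that start a run (True not preceded by True) whose 61-element window is all True, so no run length is ever tracked.
import Mathlib
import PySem

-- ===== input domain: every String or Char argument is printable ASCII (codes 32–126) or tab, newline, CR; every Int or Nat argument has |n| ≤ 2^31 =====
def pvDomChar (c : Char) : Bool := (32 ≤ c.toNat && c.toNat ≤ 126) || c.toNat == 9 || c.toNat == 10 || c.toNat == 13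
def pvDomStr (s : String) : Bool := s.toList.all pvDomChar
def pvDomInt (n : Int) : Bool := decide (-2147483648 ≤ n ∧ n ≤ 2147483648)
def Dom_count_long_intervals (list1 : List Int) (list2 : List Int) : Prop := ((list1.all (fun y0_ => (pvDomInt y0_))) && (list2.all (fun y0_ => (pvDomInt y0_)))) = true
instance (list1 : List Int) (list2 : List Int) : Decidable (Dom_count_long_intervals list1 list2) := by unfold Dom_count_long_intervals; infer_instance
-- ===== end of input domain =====

-- B replaces A's in_interval/interval_length state machine with a stateless per-index run-start test on the precomputed comparison sequence (alternative decomposition; same O(n) cost).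


-- ===== PORT A =====
-- state machine over indices: (count, in_interval, interval_length)
def count_long_intervals (list1 : List Int) (list2 : List Int) : Int :=
  -- the len(list1) != len(list2) ValueError is excluded by Pre_count_long_intervals
  let res := (PySem.List.pyRange 0 (list1.length : Int) 1).foldl
    (fun (st : Int × Bool × Int) i =>
      let count := st.1
      let in_interval := st.2.1
      let interval_length := st.2.2
      -- list index i ∈ [0, len) here, so the default of pyGetD is never used
      if PySem.List.pyGetD list2 i 0 < PySem.List.pyGetD list1 i 0 then
        if !in_interval then (count, true, 1)
        else (count, in_interval, interval_length + 1)
      else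
        if in_interval then
          ((if interval_length > 60 then count + 1 else count), false, 0)
        else (count, in_interval, interval_length))
    (0, false, 0)
  if res.2.1 && decide (res.2.2 > 60) then res.1 + 1 else res.1

-- ===== PORT B =====
-- stateless: count the indices that start a run of cmps whose 61-wide window is all True
def count_long_intervals_alt (list1 : List Int) (list2 : List Int) : Int :=
  -- the len(list1) != len(list2) ValueError is excluded by Pre_count_long_intervals
  let cmps := (list1.zip list2).map (fun p => decide (p.2 < p.1))
  let n : Int := (cmps.length : Int)
  (PySem.List.pyRange 0 n 1).foldl
    (fun c i =>
      if (PySem.List.pyGetD cmps i false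
          && ((i == 0) || !(PySem.List.pyGetD cmps (i - 1) false))
          && decide (i + 61 ≤ n)
          && (PySem.List.slice cmps (some i) (some (i + 61))).all id)
      then c + 1 else c) 0

-- ===== PRECONDITION & SPEC =====
-- Pre_ excludes exactly the inputs of unequal length, on which A raises ValueError (B raises the same).
def Pre_count_long_intervals (list1 : List Int) (list2 : List Int) : Prop := list1.length = list2.length
instance (list1 : List Int) (list2 : List Int) : Decidable (Pre_count_long_intervals list1 list2) := by unfold Pre_count_long_intervals; infer_instance
def pvWitness_count_long_intervals : List Int × List Int := ([1, 0], [0, 5])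

def Spec_count_long_intervals (list1 : List Int) (list2 : List Int) (out : Int) : Prop := out = count_long_intervals_alt list1 list2
instance (list1 : List Int) (list2 : List Int) (out : Int) : Decidable (Spec_count_long_intervals list1 list2 out) := by unfold Spec_count_long_intervals; infer_instance

-- ===== CLAIM (what is proved, stated in full; the proofs are below) =====
def Claim_equal_count_long_intervals : Prop := ∀ (list1 : List Int) (list2 : List Int), Dom_count_long_intervals list1 list2 → Pre_count_long_intervals list1 list2 → Spec_count_long_intervals list1 list2 (count_long_intervals list1 list2)

-- ===== LEMMAS AND PROOFS =====

-- fold over range(len) indexing two equal-length lists = fold over their zip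
theorem fold_range_eq_fold_zip {σ : Type} (f : σ → Int → Int → σ) :
    ∀ (l1 l2 : List Int), l1.length = l2.length → ∀ (init : σ),
      (List.range l1.length).foldl (fun s k => f s (l1.getD k 0) (l2.getD k 0)) init
      = (l1.zip l2).foldl (fun s p => f s p.1 p.2) init := by
  intro l1
  induction l1 with
  | nil => intro l2 h init; simp
  | cons x xs ih =>
    intro l2 h init
    cases l2 with
    | nil => simp at h
    | cons y ys =>
      simp only [List.length_cons, List.range_succ_eq_map, List.foldl_cons, List.foldl_map,
        List.zip_cons_cons]
      simp only [List.getD_cons_zero, List.getD_cons_succ]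
      exact ih ys (by simpa using h) (f init x y)

-- A's step, on the boolean comparison value
def astep (st : Int × Bool × Int) (b : Bool) : Int × Bool × Int :=
  if b then
    if !st.2.1 then (st.1, true, 1) else (st.1, st.2.1, st.2.2 + 1)
  else
    if st.2.1 then ((if st.2.2 > 60 then st.1 + 1 else st.1), false, 0)
    else (st.1, st.2.1, st.2.2)

def afin (st : Int × Bool × Int) : Int := if st.2.1 && decide (st.2.2 > 60) then st.1 + 1 else st.1

-- reference: count runs > 60, given a pending run of length r
def longRuns : List Bool → Int → Int
  | [], r => if r > 60 then 1 else 0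
  | (true :: c), r => longRuns c (r + 1)
  | (false :: c), r => (if r > 60 then 1 else 0) + longRuns c 0

-- length of the leading True-prefix
def leadTrue : List Bool → Nat
  | [] => 0
  | (true :: c) => leadTrue c + 1
  | (false :: _) => 0

-- the 61-window test at index i, Nat form
def win (c : List Bool) (i : Nat) : Bool :=
  decide (i + 61 ≤ c.length) && ((c.drop i).take 61).all id

def bpred (c : List Bool) (prev : Bool) (i : Nat) : Bool :=
  c.getD i false && (if i == 0 then !prev else !(c.getD (i - 1) false)) && win c i

def bcount (c : List Bool) (prev : Bool) : Nat := (List.range c.length).countP (bpred c prev)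

theorem winK : ∀ (c : List Bool) (k : Nat),
    (decide (k ≤ c.length) && (c.take k).all id) = decide (k ≤ leadTrue c) := by
  intro c
  induction c with
  | nil => intro k; cases k <;> simp [leadTrue]
  | cons x rest ih =>
    intro k
    cases k with
    | zero => simp
    | succ j =>
      cases x with
      | true =>
        have := ih j
        simp only [List.take_succ_cons, List.all_cons, leadTrue, List.length_cons]
        simpa [Nat.add_le_add_iff_right] using this
      | false => simp [leadTrue]

theorem win_zero (c : List Bool) : win c 0 = decide (61 ≤ leadTrue c) := by
  simpa [win] using winK c 61

theorem bcount_cons (x : Bool) (c : List Bool) (prev : Bool) :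
    bcount (x :: c) prev
      = (if (x && !prev && win (x :: c) 0) then 1 else 0) + bcount c x := by
  unfold bcount
  simp only [List.length_cons, List.range_succ_eq_map, List.countP_cons, List.countP_map]
  have hpred0 : bpred (x :: c) prev 0 = (x && !prev && win (x :: c) 0) := by
    simp [bpred]
  have hshift : ∀ i : Nat, bpred (x :: c) prev (i + 1) = bpred c x i := by
    intro i
    cases i with
    | zero => simp [bpred, win]
    | succ j => simp [bpred, win]
  have : List.countP (bpred (x :: c) prev ∘ Nat.succ) (List.range c.length)
       = List.countP (bpred c x) (List.range c.length) := by
    apply List.countP_congr; intro i _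
    simp only [Function.comp, Nat.succ_eq_add_one, hshift i]
  rw [this, hpred0]
  rcases Bool.eq_false_or_eq_true (x && !prev && win (x :: c) 0) with h | h <;>
    simp [h, Nat.add_comm]

-- key invariant: the reference count equals B's start-count plus a possible boundary run
theorem longRuns_eq_bcount : ∀ (c : List Bool) (r : Int), 0 ≤ r →
    longRuns c r = (bcount c (decide (0 < r)) : Int)
      + (if 0 < r ∧ r + (leadTrue c : Int) > 60 then 1 else 0) := by
  intro c
  induction c with
  | nil =>
    intro r hr
    simp only [longRuns, bcount, leadTrue, List.length_nil, List.range_zero, List.countP_nil]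
    split_ifs <;> simp_all <;> omega
  | cons x rest ih =>
    intro r hr
    cases x with
    | true =>
      have hIH := ih (r + 1) (by omega)
      simp only [longRuns, leadTrue]
      rw [hIH, bcount_cons]
      have hw : win (true :: rest) 0 = decide (61 ≤ leadTrue rest + 1) := by
        simpa [leadTrue] using win_zero (true :: rest)
      rw [hw]
      have h1 : decide (0 < r + 1) = true := by simp; omega
      rw [h1]
      push_cast
      by_cases h0 : 0 < r
      · have : decide (0 < r) = true := by simpa using h0
        rw [this]
        simp only [Bool.not_true, Bool.and_false, Bool.false_and]
        split_ifs <;> push_cast at * <;> omega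
      · have hr0 : r = 0 := by omega
        subst hr0
        simp only [Bool.true_and]
        norm_num
        split_ifs <;> push_cast at * <;> omega
    | false =>
      have hIH : longRuns rest 0 = (bcount rest false : Int) := by
        simpa using ih 0 le_rfl
      simp only [longRuns, leadTrue]
      rw [hIH, bcount_cons]
      simp only [Bool.false_and, Bool.false_eq_true, if_false, Nat.zero_add]
      push_cast
      split_ifs <;> push_cast at * <;> omega

-- A's fold computes the reference count
theorem afold_eq_longRuns : ∀ (c : List Bool) (count r : Int), 0 ≤ r →
    afin (c.foldl astep (count, decide (0 < r), r)) = count + longRuns c r := by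
  intro c
  induction c with
  | nil =>
    intro count r hr
    simp only [List.foldl_nil, afin, longRuns]
    by_cases h0 : 0 < r
    · have : decide (0 < r) = true := by simpa using h0
      rw [this]
      simp only [Bool.true_and, decide_eq_true_eq]
      split_ifs <;> omega
    · have hr0 : r = 0 := by omega
      subst hr0
      simp
  | cons x rest ih =>
    intro count r hr
    simp only [List.foldl_cons]
    cases x with
    | true =>
      have hst : astep (count, decide (0 < r), r) true = (count, decide (0 < r + 1), r + 1) := by
        by_cases h0 : 0 < r
        · have h1 : (decide (0 < r)) = true := by simpa using h0
          simp [astep, h1]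
          omega
        · have : r = 0 := by omega
          subst this; simp [astep]
      rw [hst]
      simpa [longRuns] using ih (count) (r + 1) (by omega)
    | false =>
      have hst : astep (count, decide (0 < r), r) false
          = (count + (if r > 60 then 1 else 0), decide ((0:Int) < 0), 0) := by
        by_cases h0 : 0 < r
        · have : decide (0 < r) = true := by simpa using h0
          simp only [astep, if_false, Bool.false_eq_true, this, if_true]
          split_ifs <;> simp
        · have : r = 0 := by omega
          subst this; simp [astep]
      rw [hst]
      rw [ih (count + (if r > 60 then 1 else 0)) 0 (by omega)]
      simp [longRuns]; ring
  -- (cases above close all goals)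

-- B's port computes bcount of the comparison sequence
theorem bport_eq_bcount (l1 l2 : List Int) :
    count_long_intervals_alt l1 l2
      = (bcount ((l1.zip l2).map (fun p => decide (p.2 < p.1))) false : Int) := by
  unfold count_long_intervals_alt
  set c := (l1.zip l2).map (fun p => decide (p.2 < p.1)) with hc
  simp only
  rw [PySem.List.pyRange_zero_nat, List.foldl_map]
  have hpt : ∀ i : Nat,
      (PySem.List.pyGetD c ((i : Nat) : Int) false
        && ((((i : Nat) : Int) == 0) || !(PySem.List.pyGetD c (((i : Nat) : Int) - 1) false))
        && decide (((i : Nat) : Int) + 61 ≤ (c.length : Int))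
        && (PySem.List.slice c (some ((i : Nat) : Int)) (some (((i : Nat) : Int) + 61))).all id)
      = bpred c false i := by
    intro i
    have hslice : PySem.List.slice c (some ((i : Nat) : Int)) (some (((i : Nat) : Int) + 61))
        = (c.drop i).take 61 := by
      have := PySem.List.slice_natCast_add c i 61
      simpa using this
    have hlen : decide (((i : Nat) : Int) + 61 ≤ (c.length : Int)) = decide (i + 61 ≤ c.length) := by
      simp only [decide_eq_decide]; omega
    cases i with
    | zero =>
      rw [hslice, hlen]
      simp [bpred, win, PySem.List.pyGetD_zero, List.getD, Bool.and_assoc]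
    | succ j =>
      have h1 : (((j + 1 : Nat) : Int) - 1) = ((j : Nat) : Int) := by push_cast; ring
      rw [hslice, hlen, h1, PySem.List.pyGetD_natCast, PySem.List.pyGetD_natCast]
      have h0 : ((((j + 1 : Nat) : Int)) == 0) = false := by
        simp only [beq_eq_false_iff_ne, ne_eq]
        omega
      rw [h0]
      simp [bpred, win, Bool.and_assoc]
  have : (List.range c.length).foldl
      (fun acc i =>
        if (PySem.List.pyGetD c ((i : Nat) : Int) false
            && ((((i : Nat) : Int) == 0) || !(PySem.List.pyGetD c (((i : Nat) : Int) - 1) false))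
            && decide (((i : Nat) : Int) + 61 ≤ (c.length : Int))
            && (PySem.List.slice c (some ((i : Nat) : Int)) (some (((i : Nat) : Int) + 61))).all id)
        then acc + 1 else acc) (0 : Int)
      = (List.range c.length).foldl (fun acc i => if bpred c false i then acc + 1 else acc) 0 := by
    apply PySem.List.foldl_congr_mem
    intro acc i _
    rw [hpt i]
  rw [this, PySem.List.foldl_if_add_one]
  simp [bcount]

-- ===== VERDICT (by name: the statement is the Claim_ definition above) =====
theorem count_long_intervals_spec : Claim_equal_count_long_intervals := by
  intro l1 l2 _ hpre
  unfold Spec_count_long_intervals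
  unfold count_long_intervals
  rw [bport_eq_bcount]
  rw [PySem.List.pyRange_zero_nat, List.foldl_map]
  simp only [PySem.List.pyGetD_natCast]
  rw [fold_range_eq_fold_zip
        (fun s a b =>
          if b < a then
            if !s.2.1 then (s.1, true, 1) else (s.1, s.2.1, s.2.2 + 1)
          else
            if s.2.1 then ((if s.2.2 > 60 then s.1 + 1 else s.1), false, 0)
            else (s.1, s.2.1, s.2.2))
        l1 l2 hpre]
  have hfold : (l1.zip l2).foldl
      (fun (s : Int × Bool × Int) (p : Int × Int) =>
        if p.2 < p.1 then
          if !s.2.1 then (s.1, true, 1) else (s.1, s.2.1, s.2.2 + 1)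
        else
          if s.2.1 then ((if s.2.2 > 60 then s.1 + 1 else s.1), false, 0)
          else (s.1, s.2.1, s.2.2)) ((0 : Int), false, (0 : Int))
      = ((l1.zip l2).map (fun p => decide (p.2 < p.1))).foldl astep ((0 : Int), false, (0 : Int)) := by
    rw [List.foldl_map]
    apply PySem.List.foldl_congr_mem
    intro s p _
    simp [astep]
  rw [hfold]
  have h1 : ((0 : Int), false, (0 : Int)) = ((0 : Int), decide ((0:Int) < 0), (0 : Int)) := by
    norm_num
  rw [h1]
  show afin (((l1.zip l2).map (fun p => decide (p.2 < p.1))).foldl astep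
      ((0 : Int), decide ((0:Int) < 0), (0 : Int)))
    = ((bcount ((l1.zip l2).map (fun p => decide (p.2 < p.1))) false : Nat) : Int)
  rw [afold_eq_longRuns _ 0 0 le_rfl,
    longRuns_eq_bcount ((l1.zip l2).map (fun p => decide (p.2 < p.1))) 0 le_rfl]
  norm_num
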